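-- pv_equiv track=rewrite | github.com/p--q/UNOIDLtype | UNOIDLtype/tools/createIDLs.py | _createNested
-- ===== SOURCE A (Python) =====
-- def _createNested(ms):
--     s = ""
--     ms.reverse()
--     out = ms.pop()
--     for m in ms:
--         s = " {" + m + s + "};"
--     s = out + s
--     return s
-- ===== SOURCE B (Python) =====
-- def _createNested(ms):
--     ms.reverse()
--     out = ms.pop()
--     return out + "".join(" {" + m for m in reversed(ms)) + "};" * len(ms)
-- ===== Notes on version B (the rewrite author's own statement) =====
-- stated objective: faster
-- what changed: The interleaving accumulator loop (which rebuilds the whole string with ' {m' ... '};' wrappers on every iteration, quadratic copying) is replaced by a closed-form construction: all opening ' {m' fragments are joined in one pass and all '};' closers appended as one replicated string; the in-place reverse+pop (mutation and IndexError on []) is kept.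
import Mathlib
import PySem

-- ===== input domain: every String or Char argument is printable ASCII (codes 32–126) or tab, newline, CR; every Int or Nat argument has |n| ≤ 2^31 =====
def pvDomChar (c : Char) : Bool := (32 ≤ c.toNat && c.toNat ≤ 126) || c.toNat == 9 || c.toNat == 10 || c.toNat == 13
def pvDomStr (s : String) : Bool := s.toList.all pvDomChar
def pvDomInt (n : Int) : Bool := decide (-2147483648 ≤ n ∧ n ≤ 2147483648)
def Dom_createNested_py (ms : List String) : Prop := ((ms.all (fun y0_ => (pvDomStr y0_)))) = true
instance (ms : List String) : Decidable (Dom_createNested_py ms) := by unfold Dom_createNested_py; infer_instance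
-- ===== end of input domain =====

-- B replaces A's interleaving accumulator loop by a closed-form join of the opening
-- fragments plus a replicated run of '};' closers (objective: faster — A recopies the whole string each iteration, B builds it once).
-- Both programs mutate their argument in place (reverse + pop); the equivalence proved
-- here is about the RETURN value only (B performs the same mutation).

-- ===== PORT A =====
def createNested_py (ms : List String) : String :=
  -- s = ""; ms.reverse(); out = ms.pop()
  match PySem.List.pop? ms.reverse (-1) with
  | none => ""   -- IndexError on empty ms; excluded by Pre_
  | some (out, rest) =>
    -- for m in ms: s = " {" + m + s + "};"
    let s := rest.foldl (fun s m => " {" ++ m ++ s ++ "};") ""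
    out ++ s

-- ===== PORT B =====
-- '"};" * n' ported by hand as a recursive replication (exact for n ≥ 0)
def strRepeat (s : String) : Nat → String
  | 0 => ""
  | n + 1 => s ++ strRepeat s n

-- '"".join(parts)' ported by hand as a left fold of string concatenation (exact)
def strConcat (parts : List String) : String := parts.foldl (· ++ ·) ""

def createNested_py_alt (ms : List String) : String :=
  -- ms.reverse(); out = ms.pop()
  match PySem.List.pop? ms.reverse (-1) with
  | none => ""   -- IndexError on empty ms; excluded by Pre_
  | some (out, rest) =>
    out ++ strConcat (rest.reverse.map (fun m => " {" ++ m)) ++ strRepeat "};" rest.length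

-- ===== PRECONDITION & SPEC =====
-- Pre_ excludes only the empty list, on which A (and B) raise IndexError via ms.pop().
def Pre_createNested_py (ms : List String) : Prop := ms ≠ []
instance (ms : List String) : Decidable (Pre_createNested_py ms) := by unfold Pre_createNested_py; infer_instance
def pvWitness_createNested_py : List String := ["a", "b", "c"]

def Spec_createNested_py (ms : List String) (out : String) : Prop := out = createNested_py_alt ms
instance (ms : List String) (out : String) : Decidable (Spec_createNested_py ms out) := by unfold Spec_createNested_py; infer_instance

-- ===== CLAIM (what is proved, stated in full; the proofs are below) =====
def Claim_equal_createNested_py : Prop := ∀ (ms : List String), Dom_createNested_py ms → Pre_createNested_py ms → Spec_createNested_py ms (createNested_py ms)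

-- ===== LEMMAS AND PROOFS =====

theorem foldl_append_acc (l : List String) : ∀ (a : String),
    l.foldl (· ++ ·) a = a ++ l.foldl (· ++ ·) "" := by
  induction l with
  | nil => intro a; simp [String.append_empty]
  | cons y ys ih =>
    intro a
    rw [List.foldl_cons, List.foldl_cons, ih, ih ("" ++ y), String.empty_append,
      String.append_assoc]

theorem strConcat_cons (x : String) (xs : List String) :
    strConcat (x :: xs) = x ++ strConcat xs := by
  unfold strConcat
  rw [List.foldl_cons, String.empty_append, foldl_append_acc]

theorem strRepeat_append_self (s : String) (n : Nat) :
    strRepeat s n ++ s = s ++ strRepeat s n := by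
  induction n with
  | zero => simp [strRepeat, String.append_empty, String.empty_append]
  | succ k ih => simp only [strRepeat, String.append_assoc, ih]

-- the heart: A's loop over l equals B's closed form over l
theorem loop_eq_closed (l : List String) :
    l.foldl (fun s m => " {" ++ m ++ s ++ "};") "" =
      strConcat (l.reverse.map (fun m => " {" ++ m)) ++ strRepeat "};" l.length := by
  induction l using List.reverseRecOn with
  | nil => simp [strConcat, strRepeat, String.append_empty]
  | append_singleton t m ih =>
    rw [List.foldl_append]
    simp only [List.foldl_cons, List.foldl_nil, ih, List.reverse_append,
      List.reverse_singleton, List.singleton_append, List.map_cons, strConcat_cons,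
      List.length_append, List.length_singleton]
    have h1 : t.length + 1 = Nat.succ t.length := rfl
    rw [h1]
    simp only [strRepeat, String.append_assoc]
    rw [strRepeat_append_self]

-- ===== VERDICT (by name: the statement is the Claim_ definition above) =====
theorem createNested_py_spec : Claim_equal_createNested_py := by
  intro ms _ hpre
  unfold Spec_createNested_py createNested_py createNested_py_alt
  obtain ⟨x, t, rfl⟩ := List.exists_cons_of_ne_nil hpre
  have hrev : (x :: t).reverse = t.reverse ++ [x] := by simp
  rw [hrev, PySem.List.pop?_last]
  simp only [loop_eq_closed]
  rw [String.append_assoc]
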